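-- pv_equiv track=rewrite | github.com/sq2012/my-job | ecopro-10.0_ZKHNZZ-20170724-02/mysite/iclock/printCalc.py | GetattTotalLeaveFiled
-- ===== SOURCE A (Python) =====
-- def GetattTotalLeaveFiled(fieldcaptions,fieldnames):#获得假类汇总表字段
-- #	print 1111,fieldcaptions,fieldnames
-- 	head=[]
-- 	showField=[]
-- 	disable=['userid','deptid','WorkTime', 'AttTime','Leave_5', 'Leave_6', 'Leave_7', 'Leave_8', 'Leave_9', 'Leave_10', 'Leave_11','Leave_12']
-- 	showable=['badgenumber', 'username', 'Leave', 'Leave_1', 'Leave_2', 'Leave_3', 'Leave_4', 'Leave_5', 'Leave_6', 'Leave_7', 'Leave_8', 'Leave_9', 'Leave_10',  ]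
-- #	showable=fieldnames
-- #	print fieldnames,type(fieldnames)
-- 	l=[]
-- 	i=0
-- 	for ff in fieldnames[:20]:
-- 		if ff in ['userid','deptid']:
-- 			pass
-- #		if ff in showable:
-- 		else:
-- 			l.append(i)
-- 			showField.append(ff)
-- 			i+=1
-- 			continue
-- 		i+=1
-- 	j=0
-- 	for fc in fieldcaptions:
-- 		if j in l:
-- 			j+=1
-- 			head.append(fc)
-- 			continue
-- 		j+=1
-- #	print 66222,head,showField
-- 	return head,showField
-- ===== SOURCE B (Python) =====
-- def GetattTotalLeaveFiled(fieldcaptions, fieldnames):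
--     # one combined pass over the first 20 field names
--     head = []
--     showField = []
--     for idx, ff in enumerate(fieldnames[:20]):
--         if ff not in ('userid', 'deptid'):
--             showField.append(ff)
--             if idx < len(fieldcaptions):
--                 head.append(fieldcaptions[idx])
--     return head, showField
-- ===== Notes on version B (the rewrite author's own statement) =====
-- stated objective: simpler
-- what changed: Dropped the dead disable/showable locals and the intermediate index list l; one pass over enumerate(fieldnames[:20]) builds head and showField together instead of a first loop collecting indices and a second loop rescanning every caption with a 'j in l' membership test.
import Mathlib
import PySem

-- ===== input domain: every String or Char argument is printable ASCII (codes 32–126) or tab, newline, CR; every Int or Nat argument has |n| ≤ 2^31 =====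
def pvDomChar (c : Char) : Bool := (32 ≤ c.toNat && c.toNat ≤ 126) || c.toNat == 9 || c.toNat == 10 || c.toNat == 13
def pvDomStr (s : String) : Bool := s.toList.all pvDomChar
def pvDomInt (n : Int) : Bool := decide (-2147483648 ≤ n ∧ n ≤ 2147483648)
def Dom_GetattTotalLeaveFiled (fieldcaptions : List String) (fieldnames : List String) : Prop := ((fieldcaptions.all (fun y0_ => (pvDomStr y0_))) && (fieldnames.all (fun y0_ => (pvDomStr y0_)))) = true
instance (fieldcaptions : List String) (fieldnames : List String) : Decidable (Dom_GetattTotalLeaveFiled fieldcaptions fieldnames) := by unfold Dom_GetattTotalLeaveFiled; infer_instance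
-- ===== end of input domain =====

-- B merges A's two loops (index-list build + caption rescan) into one pass over the
-- enumerated first 20 field names, dropping A's dead locals; objective: simpler.


-- ===== PORT A =====
-- first loop body: state (l, showField, i)
def pvALoop1 (acc : List Int × List String × Int) (ff : String) : List Int × List String × Int :=
  if ff = "userid" ∨ ff = "deptid" then (acc.1, acc.2.1, acc.2.2 + 1)
  else (acc.1 ++ [acc.2.2], acc.2.1 ++ [ff], acc.2.2 + 1)

-- second loop body: state (head, j)
def pvALoop2 (l : List Int) (acc : List String × Int) (fc : String) : List String × Int :=
  if acc.2 ∈ l then (acc.1 ++ [fc], acc.2 + 1) else (acc.1, acc.2 + 1)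

def GetattTotalLeaveFiled (fieldcaptions : List String) (fieldnames : List String) : List String × List String :=
  let _disable := ["userid", "deptid", "WorkTime", "AttTime", "Leave_5", "Leave_6", "Leave_7", "Leave_8", "Leave_9", "Leave_10", "Leave_11", "Leave_12"]
  let _showable := ["badgenumber", "username", "Leave", "Leave_1", "Leave_2", "Leave_3", "Leave_4", "Leave_5", "Leave_6", "Leave_7", "Leave_8", "Leave_9", "Leave_10"]
  let st := (PySem.List.slice fieldnames none (some 20)).foldl pvALoop1 ([], [], 0)
  let fin := fieldcaptions.foldl (pvALoop2 st.1) ([], 0)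
  (fin.1, st.2.1)

-- ===== PORT B =====
-- one pass over the enumerated (idx, ff) field names; fieldcaptions[idx] via pyGet?
def pvBGo (fieldcaptions : List String) (idx : Int) : List String → List String × List String
  | [] => ([], [])
  | ff :: rest =>
    let r := pvBGo fieldcaptions (idx + 1) rest
    if ff = "userid" ∨ ff = "deptid" then r
    else
      ((if idx < (fieldcaptions.length : Int) then
          match PySem.List.pyGet? fieldcaptions idx with
          | some c => c :: r.1
          | none => r.1
        else r.1), ff :: r.2)

def GetattTotalLeaveFiled_alt (fieldcaptions : List String) (fieldnames : List String) : List String × List String :=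
  pvBGo fieldcaptions 0 (PySem.List.slice fieldnames none (some 20))

-- ===== PRECONDITION & SPEC =====
def Spec_GetattTotalLeaveFiled (fieldcaptions : List String) (fieldnames : List String) (out : List String × List String) : Prop := out = GetattTotalLeaveFiled_alt fieldcaptions fieldnames
instance (fieldcaptions : List String) (fieldnames : List String) (out : List String × List String) : Decidable (Spec_GetattTotalLeaveFiled fieldcaptions fieldnames out) := by unfold Spec_GetattTotalLeaveFiled; infer_instance

-- ===== CLAIM (what is proved, stated in full; the proofs are below) =====
def Claim_equal_GetattTotalLeaveFiled : Prop := ∀ (fieldcaptions : List String) (fieldnames : List String), Dom_GetattTotalLeaveFiled fieldcaptions fieldnames → Spec_GetattTotalLeaveFiled fieldcaptions fieldnames (GetattTotalLeaveFiled fieldcaptions fieldnames)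

-- ===== LEMMAS AND PROOFS =====

def pvKept (ff : String) : Bool := !(ff = "userid" ∨ ff = "deptid")

-- indices (starting at i0) of the kept names
def pvKeptIdx : List String → Int → List Int
  | [], _ => []
  | ff :: ns, i0 => if pvKept ff then i0 :: pvKeptIdx ns (i0 + 1) else pvKeptIdx ns (i0 + 1)

-- canonical mask-select: one caption consumed per name, kept names keep their caption
def pvSel : List String → List String → List String
  | [], _ => []
  | _ :: _, [] => []
  | ff :: ns, fc :: fcs => if pvKept ff then fc :: pvSel ns fcs else pvSel ns fcs

-- captions picked by A's second loop
def pvPick (l : List Int) : List String → Int → List String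
  | [], _ => []
  | fc :: fcs, j0 => if j0 ∈ l then fc :: pvPick l fcs (j0 + 1) else pvPick l fcs (j0 + 1)

theorem pvALoop1_char (ns : List String) : ∀ (l0 : List Int) (s0 : List String) (i0 : Int),
    ns.foldl pvALoop1 (l0, s0, i0) = (l0 ++ pvKeptIdx ns i0, s0 ++ ns.filter pvKept, (i0 + ns.length : Int)) := by
  induction ns with
  | nil => simp [pvKeptIdx]
  | cons ff ns ih =>
    intro l0 s0 i0
    simp only [List.foldl_cons, pvALoop1, pvKeptIdx, pvKept, List.filter_cons]
    by_cases h : ff = "userid" ∨ ff = "deptid" <;>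
      simp [h, ih, List.append_assoc] <;> ring

theorem pvALoop2_char (l : List Int) (fcs : List String) : ∀ (h0 : List String) (j0 : Int),
    fcs.foldl (pvALoop2 l) (h0, j0) = (h0 ++ pvPick l fcs j0, (j0 + fcs.length : Int)) := by
  induction fcs with
  | nil => simp [pvPick]
  | cons fc fcs ih =>
    intro h0 j0
    simp only [List.foldl_cons, pvALoop2, pvPick]
    by_cases h : j0 ∈ l <;> simp [h, ih, List.append_assoc] <;> ring

theorem pvPick_nil (fcs : List String) : ∀ j0, pvPick [] fcs j0 = [] := by
  induction fcs with
  | nil => intro; rfl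
  | cons fc fcs ih => intro j0; simp [pvPick, ih]

theorem pvPick_drop_lt (a : Int) (l : List Int) (fcs : List String) :
    ∀ j0, a < j0 → pvPick (a :: l) fcs j0 = pvPick l fcs j0 := by
  induction fcs with
  | nil => intros; rfl
  | cons fc fcs ih =>
    intro j0 h
    have hne : j0 ≠ a := by omega
    simp only [pvPick, List.mem_cons, hne, false_or]
    by_cases hm : j0 ∈ l <;> simp [hm, ih (j0 + 1) (by omega)]

theorem pvKeptIdx_ge (ns : List String) : ∀ (i0 x : Int), x ∈ pvKeptIdx ns i0 → i0 ≤ x := by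
  induction ns with
  | nil => intro _ _ h; simp [pvKeptIdx] at h
  | cons ff ns ih =>
    intro i0 x h
    simp only [pvKeptIdx] at h
    by_cases hk : pvKept ff
    · simp [hk] at h
      rcases h with h | h
      · omega
      · have := ih (i0 + 1) x h; omega
    · simp [hk] at h
      have := ih (i0 + 1) x h; omega

theorem pvSel_nil (ns : List String) : pvSel ns [] = [] := by
  cases ns <;> rfl

theorem pvPick_keptIdx (ns : List String) : ∀ (fcs : List String) (j0 : Int),
    pvPick (pvKeptIdx ns j0) fcs j0 = pvSel ns fcs := by
  induction ns with
  | nil => intro fcs j0; simp [pvKeptIdx, pvPick_nil, pvSel]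
  | cons ff ns ih =>
    intro fcs j0
    cases fcs with
    | nil => simp [pvPick, pvSel_nil]
    | cons fc fcs =>
      by_cases hk : pvKept ff = true
      · rw [show pvKeptIdx (ff :: ns) j0 = j0 :: pvKeptIdx ns (j0 + 1) from by simp [pvKeptIdx, hk]]
        rw [show pvSel (ff :: ns) (fc :: fcs) = fc :: pvSel ns fcs from by simp [pvSel, hk]]
        have hstep : pvPick (j0 :: pvKeptIdx ns (j0 + 1)) (fc :: fcs) j0
            = fc :: pvPick (j0 :: pvKeptIdx ns (j0 + 1)) fcs (j0 + 1) := by simp [pvPick]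
        rw [hstep, pvPick_drop_lt _ _ _ _ (by omega), ih]
      · have hnm : j0 ∉ pvKeptIdx ns (j0 + 1) := fun hmem => by
          have := pvKeptIdx_ge ns (j0 + 1) j0 hmem; omega
        rw [show pvKeptIdx (ff :: ns) j0 = pvKeptIdx ns (j0 + 1) from by simp [pvKeptIdx, hk]]
        rw [show pvSel (ff :: ns) (fc :: fcs) = pvSel ns fcs from by simp [pvSel, hk]]
        simp only [pvPick, if_neg hnm]
        exact ih fcs (j0 + 1)

theorem pvBGo_char (fcs : List String) (ns : List String) : ∀ (n0 : Nat),
    pvBGo fcs (n0 : Int) ns = (pvSel ns (fcs.drop n0), ns.filter pvKept) := by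
  induction ns with
  | nil => intro n0; simp [pvBGo, pvSel]
  | cons ff ns ih =>
    intro n0
    have hstep : ((n0 : Int) + 1) = ((n0 + 1 : Nat) : Int) := by push_cast; ring
    have htail : fcs.drop (n0 + 1) = (fcs.drop n0).tail := List.tail_drop.symm
    have ih' : pvBGo fcs ((n0 : Int) + 1) ns = (pvSel ns (fcs.drop (n0 + 1)), ns.filter pvKept) := by
      rw [hstep]; exact ih (n0 + 1)
    by_cases h : ff = "userid" ∨ ff = "deptid"
    · have hk : pvKept ff = false := by simp [pvKept, h]
      cases hd : fcs.drop n0 with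
      | nil =>
        simp [pvBGo, ih', h, hd, htail, pvSel_nil, hk]
      | cons c cs =>
        simp [pvBGo, ih', h, hd, htail, pvSel, hk]
    · have hk : pvKept ff = true := by simp [pvKept, h]
      by_cases hlt : n0 < fcs.length
      · have hget : PySem.List.pyGet? fcs (n0 : Int) = some fcs[n0] := by
          simp [PySem.List.pyGet?_natCast, List.getElem?_eq_getElem hlt]
        have hd : fcs.drop n0 = fcs[n0] :: fcs.drop (n0 + 1) := List.drop_eq_getElem_cons hlt
        have hcast : ((n0 : Int) < (fcs.length : Int)) := by exact_mod_cast hlt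
        simp only [pvBGo, ih', if_neg h, if_pos hcast, hget]
        rw [hd]
        simp [pvSel, hk]
      · have hd : fcs.drop n0 = [] := List.drop_eq_nil_of_le (by omega)
        have hd' : fcs.drop (n0 + 1) = [] := List.drop_eq_nil_of_le (by omega)
        have hnlt : ¬ ((n0 : Int) < (fcs.length : Int)) := by exact_mod_cast hlt
        simp [pvBGo, ih', h, hk, hd, hd', hnlt, pvSel_nil]

-- ===== VERDICT (by name: the statement is the Claim_ definition above) =====
theorem GetattTotalLeaveFiled_spec : Claim_equal_GetattTotalLeaveFiled := by
  intro fcs fns _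
  unfold Spec_GetattTotalLeaveFiled GetattTotalLeaveFiled GetattTotalLeaveFiled_alt
  simp only [pvALoop1_char _ [] [] 0, pvALoop2_char _ fcs [] 0, List.nil_append]
  have := pvBGo_char fcs (PySem.List.slice fns none (some 20)) 0
  simp only [Nat.cast_zero, List.drop_zero] at this
  rw [this, pvPick_keptIdx]
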